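-- pv_equiv track=rewrite | github.com/l0lsec/Masked-Username-Brute-Force-Generator | userbrute.py | generate_usernames
-- ===== SOURCE A (Python) =====
-- import itertools
-- import string
--
-- def generate_usernames(template):
--     if len(template) < 2:
--         raise ValueError("Template must have at least two characters")
--
--     first_char = template[0]
--     last_char = template[-1]
--     masked_length = len(template) - 2
--
--     chars = string.ascii_lowercase + string.digits
--     total_combinations = len(chars) ** masked_length
--
--     for combination in itertools.product(chars, repeat=masked_length):
--         yield first_char + ''.join(combination) + last_char
-- ===== SOURCE B (Python) =====
-- import string
--
-- def generate_usernames(template):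
--     if len(template) < 2:
--         raise ValueError("Template must have at least two characters")
--
--     chars = string.ascii_lowercase + string.digits
--     n = len(template) - 2
--
--     def decode(k, i):
--         # most-significant-first base-36 expansion of i into k digits
--         if k == 0:
--             return ''
--         return decode(k - 1, i // 36) + chars[i % 36]
--
--     total = 36 ** n
--     for i in range(total):
--         yield template[0] + decode(n, i) + template[-1]
-- ===== Notes on version B (the rewrite author's own statement) =====
-- stated objective: alternative
-- what changed: B replaces itertools.product over the alphabet with explicit base-36 counting: it enumerates i in range(36**n) and decodes each index into the n middle characters by repeated divmod.
import Mathlib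
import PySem

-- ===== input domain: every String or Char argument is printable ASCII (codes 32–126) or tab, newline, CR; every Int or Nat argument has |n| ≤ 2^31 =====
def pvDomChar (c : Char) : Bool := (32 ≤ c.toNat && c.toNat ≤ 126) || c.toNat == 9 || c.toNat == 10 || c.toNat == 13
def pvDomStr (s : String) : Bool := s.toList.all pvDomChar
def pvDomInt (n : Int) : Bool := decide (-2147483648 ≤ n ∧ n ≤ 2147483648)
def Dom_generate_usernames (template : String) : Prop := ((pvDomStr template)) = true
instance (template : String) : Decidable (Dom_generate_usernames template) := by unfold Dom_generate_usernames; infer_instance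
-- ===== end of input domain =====

-- B enumerates indices 0..36^n-1 and decodes each into the middle string by divmod, instead of
-- itertools.product; same outputs in the same order (equivalence is about the returned list of strings).

-- ===== PORT A =====
-- string.ascii_lowercase + string.digits
def pvChars36 : List Char := "abcdefghijklmnopqrstuvwxyz0123456789".toList

-- itertools.product(chars, repeat=n): first position varies slowest
def pvProdRep : Nat → List (List Char)
  | 0 => [[]]
  | n + 1 => pvChars36.flatMap (fun c => (pvProdRep n).map (fun rest => c :: rest))

def generate_usernames (template : String) : List String :=
  let l := template.toList
  if l.length < 2 then []  -- Python raises ValueError here; excluded by Pre_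
  else
    let first := l.headD ' '        -- template[0]; list nonempty under the guard
    let last := l.getLastD ' '      -- template[-1]
    let masked_length := l.length - 2
    (pvProdRep masked_length).map (fun combination => String.mk (first :: combination ++ [last]))

-- ===== PORT B =====
-- decode(k, i): most-significant-first base-36 expansion of i into k digits
-- (Python's //, % on nonnegative ints coincide with Nat's / and %)
def pvDecode : Nat → Nat → List Char
  | 0, _ => []
  | k + 1, i => pvDecode k (i / 36) ++ [pvChars36.getD (i % 36) ' ']

def generate_usernames_alt (template : String) : List String :=
  let l := template.toList
  if l.length < 2 then []  -- ValueError; excluded by Pre_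
  else
    let n := l.length - 2
    (List.range (36 ^ n)).map (fun i =>
      String.mk (l.headD ' ' :: pvDecode n i ++ [l.getLastD ' ']))

-- ===== PRECONDITION & SPEC =====
-- Pre_ excludes exactly the templates of length < 2, on which Python A raises ValueError.
def Pre_generate_usernames (template : String) : Prop := 2 ≤ template.toList.length
instance (template : String) : Decidable (Pre_generate_usernames template) := by
  unfold Pre_generate_usernames; infer_instance

def pvWitness_generate_usernames : String := "a_b"

def Spec_generate_usernames (template : String) (out : List String) : Prop := out = generate_usernames_alt template
instance (template : String) (out : List String) : Decidable (Spec_generate_usernames template out) := by unfold Spec_generate_usernames; infer_instance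

-- ===== CLAIM (what is proved, stated in full; the proofs are below) =====
def Claim_equal_generate_usernames : Prop := ∀ (template : String), Dom_generate_usernames template → Pre_generate_usernames template → Spec_generate_usernames template (generate_usernames template)

-- ===== LEMMAS AND PROOFS =====

-- q < 36 digits split off most-significant-first
lemma pvDecode_split (n q r : Nat) (hq : q < 36) (hr : r < 36 ^ n) :
    pvDecode (n + 1) (q * 36 ^ n + r) = pvChars36.getD q ' ' :: pvDecode n r := by
  induction n generalizing r with
  | zero =>
    have hr0 : r = 0 := by omega
    subst hr0
    simp [pvDecode, Nat.mod_eq_of_lt hq]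
  | succ n ih =>
    have hsplit : ∀ Q r' : Nat, (Q * 36 + r') / 36 = Q + r' / 36 ∧ (Q * 36 + r') % 36 = r' % 36 := by
      intro Q r'; omega
    have he : q * 36 ^ (n + 1) + r = (q * 36 ^ n) * 36 + r := by ring_nf
    have hd : (q * 36 ^ (n + 1) + r) / 36 = q * 36 ^ n + r / 36 := by
      rw [he]; exact (hsplit _ _).1
    have hm : (q * 36 ^ (n + 1) + r) % 36 = r % 36 := by
      rw [he]; exact (hsplit _ _).2
    have hr' : r / 36 < 36 ^ n := by
      have hp : (36 : Nat) ^ (n + 1) = 36 ^ n * 36 := pow_succ 36 n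
      rw [hp] at hr
      have : 0 < (36:Nat)^n := Nat.pow_pos (by norm_num)
      omega
    show pvDecode (n + 1 + 1) (q * 36 ^ (n + 1) + r) = _
    rw [show pvDecode (n + 1 + 1) (q * 36 ^ (n + 1) + r)
          = pvDecode (n + 1) ((q * 36 ^ (n + 1) + r) / 36)
            ++ [pvChars36.getD ((q * 36 ^ (n + 1) + r) % 36) ' '] from rfl,
        hd, hm, ih (r / 36) hr']
    rfl

lemma pvRange_mul_flat (a b : Nat) :
    List.range (a * b) = (List.range a).flatMap (fun q => (List.range b).map (fun r => q * b + r)) := by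
  induction a with
  | zero => simp
  | succ a ih =>
    rw [Nat.succ_mul, List.range_add, ih, List.range_succ, List.flatMap_append]
    simp

lemma pvChars36_as_range :
    (List.range 36).map (fun q => pvChars36.getD q ' ') = pvChars36 := by decide

lemma pvDecode_range (n : Nat) :
    (List.range (36 ^ n)).map (pvDecode n) = pvProdRep n := by
  induction n with
  | zero => decide
  | succ n ih =>
    rw [pow_succ', pvRange_mul_flat, List.map_flatMap]
    rw [show pvProdRep (n + 1)
          = pvChars36.flatMap (fun c => (pvProdRep n).map (fun rest => c :: rest)) from rfl,
        ← pvChars36_as_range, List.flatMap_map]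
    apply List.flatMap_congr
    intro q hq
    have hq36 : q < 36 := List.mem_range.mp hq
    rw [List.map_map]
    rw [← ih, List.map_map]
    apply List.map_congr_left
    intro r hr
    exact pvDecode_split n q r hq36 (List.mem_range.mp hr)

-- ===== VERDICT (by name: the statement is the Claim_ definition above) =====
theorem generate_usernames_spec : Claim_equal_generate_usernames := by
  intro template _ hpre
  unfold Spec_generate_usernames generate_usernames generate_usernames_alt
  have hlen : ¬ template.toList.length < 2 := by
    unfold Pre_generate_usernames at hpre; omega
  simp only [hlen, if_false]
  rw [← pvDecode_range, List.map_map]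
  rfl
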